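-- pv_equiv track=rewrite | github.com/adamlew52/encrypt-lvl1 | Encrypt.py | Encrypt3
-- ===== SOURCE A (Python) =====
-- def Encrypt3(password):
--     firstHalf = ''
--     secondHalf = ''
--     encrypt3 = ''
--     passwordLength = len(password)
--
--     for i in range(0, passwordLength):
--         if i <= len(password)//2-1:
--             firstHalf = firstHalf + password[i]
--         else:
--             secondHalf = secondHalf + password[i]
--
--     encrypt3 += secondHalf
--     encrypt3 += firstHalf
--
--     return encrypt3
-- ===== SOURCE B (Python) =====
-- def Encrypt3(password):
--     half = len(password) // 2
--     return password[half:] + password[:half]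
-- ===== Notes on version B (the rewrite author's own statement) =====
-- stated objective: simpler
-- what changed: Replaced the per-character index loop that accumulates two halves by repeated string concatenation with the closed-form slice expression password[half:] + password[:half].
import Mathlib
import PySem

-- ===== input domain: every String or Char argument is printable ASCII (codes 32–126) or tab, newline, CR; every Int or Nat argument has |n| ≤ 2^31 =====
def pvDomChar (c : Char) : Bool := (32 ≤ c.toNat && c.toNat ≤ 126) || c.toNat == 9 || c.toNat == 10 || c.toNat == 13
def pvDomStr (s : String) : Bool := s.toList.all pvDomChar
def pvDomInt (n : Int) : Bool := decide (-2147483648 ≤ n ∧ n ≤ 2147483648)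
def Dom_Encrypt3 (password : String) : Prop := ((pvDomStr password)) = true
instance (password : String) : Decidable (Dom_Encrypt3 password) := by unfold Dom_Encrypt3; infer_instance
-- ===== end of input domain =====

-- B swaps the two halves by a single slice-and-concatenate instead of A's per-index loop; objective: simpler.

-- ===== PORT A =====
-- loop step: threshold test on the index, then append the character to one of the two accumulators
-- (pyGet? is always `some` here since 0 ≤ i < len; `.getD ' '` only discharges the Option)
def Encrypt3Step (s : List Char) (acc : List Char × List Char) (i : Int) : List Char × List Char :=
  if i ≤ PySem.Int.floordiv (s.length : Int) 2 - 1 then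
    (acc.1 ++ [(PySem.List.pyGet? s i).getD ' '], acc.2)
  else
    (acc.1, acc.2 ++ [(PySem.List.pyGet? s i).getD ' '])

def Encrypt3 (password : String) : String :=
  let s := password.toList
  let passwordLength : Int := PySem.Str.len password
  let st := (PySem.List.pyRange 0 passwordLength 1).foldl (Encrypt3Step s) ([], [])
  String.ofList (st.2 ++ st.1)

-- ===== PORT B =====
def Encrypt3_alt (password : String) : String :=
  let s := password.toList
  let half : Int := PySem.Int.floordiv (PySem.Str.len password) 2
  String.ofList (PySem.List.slice s (some half) none ++ PySem.List.slice s none (some half))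

-- ===== PRECONDITION & SPEC =====
def Spec_Encrypt3 (password : String) (out : String) : Prop := out = Encrypt3_alt password
instance (password : String) (out : String) : Decidable (Spec_Encrypt3 password out) := by unfold Spec_Encrypt3; infer_instance

-- ===== CLAIM (what is proved, stated in full; the proofs are below) =====
def Claim_equal_Encrypt3 : Prop := ∀ (password : String), Dom_Encrypt3 password → Spec_Encrypt3 password (Encrypt3 password)

-- ===== LEMMAS AND PROOFS =====

lemma encrypt3_floordiv (n : Nat) : PySem.Int.floordiv (n : Int) 2 = ((n / 2 : Nat) : Int) := by
  unfold PySem.Int.floordiv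
  rw [Int.fdiv_eq_ediv_of_nonneg _ (by positivity)]
  omega

lemma encrypt3_step_eq (s : List Char) (acc : List Char × List Char) (k : Nat) (hk : k < s.length) :
    Encrypt3Step s acc (k : Int)
      = if k < s.length / 2 then (acc.1 ++ [s[k]], acc.2) else (acc.1, acc.2 ++ [s[k]]) := by
  unfold Encrypt3Step
  rw [encrypt3_floordiv, PySem.List.pyGet?_natCast, List.getElem?_eq_getElem hk]
  simp only [Option.getD_some]
  split_ifs with h1 h2 h3 <;> first | rfl | (exfalso; omega)

lemma encrypt3_loop (s : List Char) (k : Nat) (f1 f2 : List Char) :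
    (PySem.List.pyRange (k : Int) (s.length : Int) 1).foldl (Encrypt3Step s) (f1, f2)
      = (f1 ++ (s.drop k).take (s.length / 2 - k), f2 ++ s.drop (max k (s.length / 2))) := by
  by_cases hk : s.length ≤ k
  · rw [PySem.List.pyRange_one_eq_nil (by exact_mod_cast hk)]
    simp [List.drop_eq_nil_of_le, hk, le_max_of_le_left hk]
  · rw [not_le] at hk
    rw [PySem.List.pyRange_one_cons (by exact_mod_cast hk)]
    have hdrop : s.drop k = s[k] :: s.drop (k + 1) := List.drop_eq_getElem_cons hk
    have hstep1 : ((k : Int) + 1) = ((k + 1 : Nat) : Int) := by push_cast; ring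
    rw [List.foldl_cons, encrypt3_step_eq s _ k hk, hstep1]
    by_cases hc : k < s.length / 2
    · rw [if_pos hc, encrypt3_loop s (k + 1)]
      have h1 : s.length / 2 - k = (s.length / 2 - (k + 1)) + 1 := by omega
      have h2 : max (k + 1) (s.length / 2) = max k (s.length / 2) := by omega
      rw [h1, h2, hdrop, List.take_succ_cons]
      simp
    · rw [if_neg hc, encrypt3_loop s (k + 1)]
      have h1 : s.length / 2 - k = 0 := by omega
      have h2 : s.length / 2 - (k + 1) = 0 := by omega
      have h3 : max k (s.length / 2) = k := by omega
      have h4 : max (k + 1) (s.length / 2) = k + 1 := by omega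
      rw [h1, h2, h3, h4, hdrop]
      simp
termination_by s.length - k
decreasing_by all_goals omega

-- ===== VERDICT (by name: the statement is the Claim_ definition above) =====
theorem Encrypt3_spec : Claim_equal_Encrypt3 := by
  intro password _
  unfold Spec_Encrypt3 Encrypt3 Encrypt3_alt
  have h0 : (0 : Int) = ((0 : Nat) : Int) := rfl
  simp only [PySem.Str.len_eq, h0]
  rw [encrypt3_loop password.toList 0]
  rw [encrypt3_floordiv]
  rw [PySem.List.slice_from_natCast, PySem.List.slice_to_natCast]
  simp
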